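-- pv_equiv track=rewrite | github.com/tmdgh1592/PROBLEM_SOLVE | 경주로 건설.py | solution
-- ===== SOURCE A (Python) =====
-- import heapq
--
-- dirs = [(0, 1), (1, 0), (-1, 0), (0, -1)]  # 우 하 상 좌
--
-- def solution(board):
--     n = len(board)
--     answer = int(1e9)
--     visited = [[[False] * 3 for _ in range(n)] for _ in range(n)]
--     q = [(0, 0, 0, 2)]  # 비용, x좌표, y좌표, 직전 방향
--
--     while q:
--         cost, x, y, d = heapq.heappop(q)
--         visited[x][y][d] = True
--
--         if x == n - 1 and y == n - 1:
--             answer = min(answer, cost)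
--             continue
--
--         for i in range(4):
--             nx, ny = x + dirs[i][0], y + dirs[i][1]
--             is_horizontal = int(i == 0 or i == 3)  # 좌우인가
--
--             if not (0 <= nx < n and 0 <= ny < n): continue
--             if visited[nx][ny][is_horizontal]: continue
--             if board[nx][ny]: continue
--
--             if (d == 0 and is_horizontal) or (d == 1 and not is_horizontal):
--                 heapq.heappush(q, ((cost + 600, nx, ny, is_horizontal)))
--             else:
--                 heapq.heappush(q, ((cost + 100, nx, ny, is_horizontal)))
--     return answer
-- ===== SOURCE B (Python) =====
-- # Bellman-Ford-style relaxation to a fixpoint over a dist[x][y][d] table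
-- # instead of heap-based Dijkstra; same return value on every valid board.
-- # (d = 2 is the virtual start orientation: the first move always costs 100.)
-- dirs = [(0, 1), (1, 0), (-1, 0), (0, -1)]
--
-- def solution(board):
--     n = len(board)
--     INF = int(1e9)
--     dist = [[[None] * 3 for _ in range(n)] for _ in range(n)]
--     dist[0][0][2] = 0  # virtual start orientation: first move always costs 100
--     changed = True
--     while changed:
--         changed = False
--         for x in range(n):
--             for y in range(n):
--                 for d in range(3):
--                     cur = dist[x][y][d]
--                     if cur is None:
--                         continue
--                     for i in range(4):
--                         nx, ny = x + dirs[i][0], y + dirs[i][1]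
--                         h = int(i == 0 or i == 3)
--                         if not (0 <= nx < n and 0 <= ny < n):
--                             continue
--                         if board[nx][ny]:
--                             continue
--                         w = 600 if d == 1 - h else 100
--                         nc = cur + w
--                         old = dist[nx][ny][h]
--                         if old is None or nc < old:
--                             dist[nx][ny][h] = nc
--                             changed = True
--     best = INF
--     for d in range(3):
--         v = dist[n - 1][n - 1][d]
--         if v is not None and v < best:
--             best = v
--     return best
-- ===== Notes on version B (the rewrite author's own statement) =====
-- stated objective: alternative
-- what changed: Replaced heap-based Dijkstra with a visited-on-push cut by Bellman-Ford-style relaxation: a dist[x][y][3] table is swept repeatedly to a fixpoint; the start keeps the d=2 sentinel so the first move costs 100, and the answer is the min over the three direction layers at the goal, int(1e9) if unreachable.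
-- outside the precondition, e.g. on solution([[0, 0, 1], [1, 1, 1], [9]]): A returns 1000000000, B returns 1000000000
import Mathlib
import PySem

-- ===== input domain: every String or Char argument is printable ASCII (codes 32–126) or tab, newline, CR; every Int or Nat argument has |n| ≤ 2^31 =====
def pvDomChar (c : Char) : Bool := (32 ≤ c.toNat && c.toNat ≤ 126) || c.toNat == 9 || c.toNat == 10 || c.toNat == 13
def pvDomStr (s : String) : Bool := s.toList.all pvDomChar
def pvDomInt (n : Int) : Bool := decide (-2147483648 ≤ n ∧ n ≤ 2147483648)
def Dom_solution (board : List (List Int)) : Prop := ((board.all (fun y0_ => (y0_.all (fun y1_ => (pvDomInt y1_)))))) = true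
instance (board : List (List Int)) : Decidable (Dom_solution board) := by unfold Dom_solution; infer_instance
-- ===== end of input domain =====

-- B replaces A's heap Dijkstra (visited-on-push cut) by Bellman-Ford-style
-- relaxation of a distance table swept to a fixpoint; same return value.

-- shared small helpers (identical in both Pythons: the dirs table and board access)
abbrev SState := Int × Int × Int          -- (x, y, direction layer)
abbrev EEnt := Int × SState               -- heap entry (cost, x, y, d), Python tuple order

def dirsL : List (Int × Int) := [(0, 1), (1, 0), (-1, 0), (0, -1)]

-- board[x][y]; exact under Pre_ (rows long enough); Python raises IndexError otherwise
def cellAt (board : List (List Int)) (x y : Int) : Int :=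
  (PySem.List.pyGet? ((PySem.List.pyGet? board x).getD []) y).getD 0

-- is_horizontal = int(i == 0 or i == 3): the two (0, ±1) moves
def hOf (p : Int × Int) : Int := if p.1 = 0 then 1 else 0

-- ===== PORT A =====

-- lexicographic ≤ on Python tuples (cost, x, y, d)
def leE (a b : EEnt) : Bool :=
  decide (a.1 < b.1 ∨ (a.1 = b.1 ∧ (a.2.1 < b.2.1 ∨ (a.2.1 = b.2.1 ∧
    (a.2.2.1 < b.2.2.1 ∨ (a.2.2.1 = b.2.2.1 ∧ a.2.2.2 ≤ b.2.2.2))))))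

-- heapq modelled as a sorted list: heappush = ordered insert, heappop = head
def insertSorted (e : EEnt) : List EEnt → List EEnt
  | [] => [e]
  | x :: xs => if leE e x then e :: x :: xs else x :: insertSorted e xs

-- visited[x][y][d] = True
def mark (s : SState) (v : List SState) : List SState := if s ∈ v then v else s :: v

-- all states the algorithm can ever hold: the start sentinel (0,0,2) plus the
-- in-bounds states in the two real direction layers (for the termination measure)
def spaceA (n : Int) : List SState :=
  (0, 0, 2) :: (PySem.List.pyRange 0 n 1).flatMap (fun x =>
    (PySem.List.pyRange 0 n 1).flatMap (fun y => [(x, y, 0), (x, y, 1)]))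

-- the four pushes attempted from a popped (cost, x, y, d): bounds check,
-- visited check (against the already-updated visited), wall check, weight
def pushCands (n : Int) (board : List (List Int)) (vis : List SState) (c : Int) (s : SState) :
    List EEnt :=
  dirsL.filterMap (fun p =>
    let nx := s.1 + p.1
    let ny := s.2.1 + p.2
    let h := hOf p
    if 0 ≤ nx ∧ nx < n ∧ 0 ≤ ny ∧ ny < n then
      if (nx, ny, h) ∈ vis then none
      else if cellAt board nx ny ≠ 0 then none
      else some (c + (if (s.2.2 = 0 ∧ h = 1) ∨ (s.2.2 = 1 ∧ ¬(h = 1)) then 600 else 100),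
                 (nx, ny, h))
    else none)

def pushQ (n : Int) (board : List (List Int)) (vis : List SState) (c : Int) (s : SState)
    (rest : List EEnt) : List EEnt :=
  (pushCands n board vis c s).foldl (fun acc e => insertSorted e acc) rest

-- termination measure: (unvisited states, stale heap entries)
def uaMeasure (n : Int) (vis : List SState) : Nat :=
  (spaceA n).countP (fun s => !(decide (s ∈ vis)))
def staleMeasure (vis : List SState) (q : List EEnt) : Nat :=
  q.countP (fun e => decide (e.2 ∈ vis))

-- ------- termination helper lemmas (cited by loopA's decreasing_by) -------
theorem countP_lt_of_flip {α : Type} (l : List α) (p p' : α → Bool)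
    (hmono : ∀ x ∈ l, p' x = true → p x = true) (a : α) (ha : a ∈ l)
    (hpa : p a = true) (hpa' : p' a = false) : l.countP p' < l.countP p := by
  induction l with
  | nil => cases ha
  | cons x xs ih =>
    rcases List.mem_cons.mp ha with h | h
    · subst h
      have h1 : xs.countP p' ≤ xs.countP p :=
        List.countP_mono_left (fun x hx => hmono x (List.mem_cons_of_mem _ hx))
      simp [hpa, hpa']; omega
    · have h1 := ih (fun x hx h => hmono x (List.mem_cons_of_mem _ hx) h) h
      simp only [List.countP_cons]
      rcases hx : p' x with _ | _ <;> rcases hy : p x with _ | _ <;> simp_all <;> omega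

theorem insertSorted_perm (e : EEnt) (l : List EEnt) : (insertSorted e l).Perm (e :: l) := by
  induction l with
  | nil => simp [insertSorted]
  | cons x xs ih =>
    by_cases h : leE e x = true
    · simp [insertSorted, h]
    · simp only [insertSorted, h, if_false, Bool.false_eq_true]
      exact (ih.cons x).trans (List.Perm.swap e x xs)

theorem foldl_insertSorted_perm (l acc : List EEnt) :
    (l.foldl (fun a e => insertSorted e a) acc).Perm (l ++ acc) := by
  induction l generalizing acc with
  | nil => simp
  | cons e l ih =>
    simp only [List.foldl_cons, List.cons_append]
    exact ((ih (insertSorted e acc)).trans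
      ((insertSorted_perm e acc).append_left l)).trans List.perm_middle

theorem mem_spaceA {n : Int} {x y h : Int} (hb : 0 ≤ x ∧ x < n ∧ 0 ≤ y ∧ y < n)
    (hh : h = 0 ∨ h = 1) : (x, y, h) ∈ spaceA n := by
  refine List.mem_cons_of_mem _ ?_
  refine List.mem_flatMap.mpr ⟨x, ?_, List.mem_flatMap.mpr ⟨y, ?_, ?_⟩⟩
  · exact (PySem.List.mem_pyRange_one).mpr ⟨hb.1, hb.2.1⟩
  · exact (PySem.List.mem_pyRange_one).mpr ⟨hb.2.2.1, hb.2.2.2⟩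
  · rcases hh with h | h <;> simp [h]

theorem pushCands_mem {n : Int} {board : List (List Int)} {vis : List SState} {c : Int}
    {s : SState} {e : EEnt} (he : e ∈ pushCands n board vis c s) :
    e.2 ∉ vis ∧ e.2 ∈ spaceA n := by
  rcases List.mem_filterMap.mp he with ⟨p, hp, hf⟩
  dsimp only at hf
  split at hf
  case isTrue hb =>
    split at hf
    case isTrue => simp at hf
    case isFalse hv =>
      split at hf
      case isTrue => simp at hf
      case isFalse hcell =>
        injection hf with hf; subst hf
        refine ⟨hv, mem_spaceA ⟨hb.1, hb.2.1, hb.2.2.1, hb.2.2.2⟩ ?_⟩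
        unfold hOf; split <;> simp
  case isFalse => simp at hf

theorem loopA_dec {n : Int} {visited : List SState} {c : Int} {s : SState}
    {rest q' : List EEnt} (hs : s ∈ spaceA n)
    (hq' : staleMeasure (mark s visited) q' ≤ staleMeasure (mark s visited) rest) :
    Prod.Lex (· < ·) (· < ·)
      (uaMeasure n (mark s visited), staleMeasure (mark s visited) q')
      (uaMeasure n visited, staleMeasure visited ((c, s) :: rest)) := by
  by_cases hv : s ∈ visited
  · have hm : mark s visited = visited := by simp [mark, hv]
    rw [hm] at hq' ⊢
    refine Prod.Lex.right _ ?_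
    have : staleMeasure visited ((c, s) :: rest) = staleMeasure visited rest + 1 := by
      simp [staleMeasure, hv]
    omega
  · refine Prod.Lex.left _ _ ?_
    have hm : mark s visited = s :: visited := by simp [mark, hv]
    rw [hm]
    refine countP_lt_of_flip _ _ _ ?_ s hs ?_ ?_
    · intro x hx hx'
      simp only [Bool.not_eq_eq_eq_not, Bool.not_true, decide_eq_false_iff_not] at hx' ⊢
      intro hmem; exact hx' (List.mem_cons_of_mem _ hmem)
    · simp [hv]
    · simp

theorem pushQ_stale {n : Int} {board : List (List Int)} {visited : List SState} {c : Int}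
    {s : SState} {rest : List EEnt} :
    staleMeasure (mark s visited) (pushQ n board (mark s visited) c s rest)
      ≤ staleMeasure (mark s visited) rest := by
  unfold pushQ staleMeasure
  rw [(foldl_insertSorted_perm _ _).countP_eq]
  rw [List.countP_append]
  have : (pushCands n board (mark s visited) c s).countP (fun e => decide (e.2 ∈ mark s visited)) = 0 := by
    rw [List.countP_eq_zero]
    intro e he
    simp only [decide_eq_true_eq]
    exact fun hmem => (pushCands_mem he).1 hmem
  omega

-- ------- the main loop of A: pop the lexicographically smallest entry -------
def loopA (n : Int) (board : List (List Int)) (visited : List SState) (q : List EEnt)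
    (answer : Int) (hq : ∀ e ∈ q, e.2 ∈ spaceA n) : Int :=
  match q, hq with
  | [], _ => answer
  | (c, s) :: rest, hq =>
    if s.1 = n - 1 ∧ s.2.1 = n - 1 then
      loopA n board (mark s visited) rest (min answer c)
        (fun e he => hq e (List.mem_cons_of_mem _ he))
    else
      loopA n board (mark s visited) (pushQ n board (mark s visited) c s rest) answer
        (fun e he => by
          rcases List.mem_append.mp ((foldl_insertSorted_perm _ _).mem_iff.mp he) with h | h
          · exact (pushCands_mem h).2
          · exact hq e (List.mem_cons_of_mem _ h))
  termination_by (uaMeasure n visited, staleMeasure visited q)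
  decreasing_by
  · exact loopA_dec (hq (c, s) List.mem_cons_self) le_rfl
  · exact loopA_dec (hq (c, s) List.mem_cons_self) pushQ_stale

def solution (board : List (List Int)) : Int :=
  let n : Int := board.length
  loopA n board [] [(0, (0, 0, 2))] 1000000000
    (by intro e he; simp at he; subst he; exact List.mem_cons_self)

-- ===== PORT B =====

-- scan order of B's sweeps: x, y, d (mirrors the three nested for-loops)
def stateListB (n : Int) : List SState :=
  (PySem.List.pyRange 0 n 1).flatMap (fun x =>
    (PySem.List.pyRange 0 n 1).flatMap (fun y =>
      (PySem.List.pyRange 0 3 1).map (fun d => (x, y, d))))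

-- the relaxable moves out of (x, y, d): same dirs/bounds/wall tests, B's weight form
def stepB (n : Int) (board : List (List Int)) (s : SState) : List (Int × SState) :=
  dirsL.filterMap (fun p =>
    let nx := s.1 + p.1
    let ny := s.2.1 + p.2
    let h := hOf p
    if 0 ≤ nx ∧ nx < n ∧ 0 ≤ ny ∧ ny < n then
      if cellAt board nx ny ≠ 0 then none
      else some ((if s.2.2 = 1 - h then 600 else 100), (nx, ny, h))
    else none)

def updD (d : SState → Option Int) (t : SState) (v : Int) : SState → Option Int :=
  fun t' => if t' = t then some v else d t'

-- one compare-and-overwrite of dist[nx][ny][h] against cur + w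
def relax1 (cur : Int) (st2 : (SState → Option Int) × Bool) (wt : Int × SState) :
    (SState → Option Int) × Bool :=
  match st2.1 wt.2 with
  | none => (updD st2.1 wt.2 (cur + wt.1), true)
  | some old => if cur + wt.1 < old then (updD st2.1 wt.2 (cur + wt.1), true) else st2

-- relax all moves out of s (dist[nx][ny][h] compared/overwritten in place)
def relaxB (n : Int) (board : List (List Int)) (st : (SState → Option Int) × Bool)
    (s : SState) : (SState → Option Int) × Bool :=
  match st.1 s with
  | none => st
  | some cur => (stepB n board s).foldl (relax1 cur) st

-- one full sweep of the table; returns (new dist, changed)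
def roundB (n : Int) (board : List (List Int)) (dist : SState → Option Int) :
    (SState → Option Int) × Bool :=
  (stateListB n).foldl (relaxB n board) (dist, false)

-- invariant needed only for termination: every stored distance is nonnegative
def InvB (dist : SState → Option Int) : Prop := ∀ s v, dist s = some v → 0 ≤ v

def noneCount (n : Int) (dist : SState → Option Int) : Nat :=
  (stateListB n).countP (fun s => (dist s).isNone)
def finSum (n : Int) (dist : SState → Option Int) : Nat :=
  ((stateListB n).map (fun s => ((dist s).getD 0).toNat)).sum
def mB (n : Int) (dist : SState → Option Int) : Nat × Nat := (noneCount n dist, finSum n dist)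

def NLt (a b : Nat × Nat) : Prop := Prod.Lex (· < ·) (· < ·) a b

-- a sweep either leaves everything unchanged, or reports change and shrinks the measure
def DecB (n : Int) (st st' : (SState → Option Int) × Bool) : Prop :=
  st' = st ∨ (st'.2 = true ∧ NLt (mB n st'.1) (mB n st.1))

theorem mem_stateListB {n : Int} {x y d : Int} (hb : 0 ≤ x ∧ x < n ∧ 0 ≤ y ∧ y < n)
    (hd : 0 ≤ d ∧ d < 3) : (x, y, d) ∈ stateListB n := by
  refine List.mem_flatMap.mpr ⟨x, ?_, List.mem_flatMap.mpr ⟨y, ?_, ?_⟩⟩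
  · exact (PySem.List.mem_pyRange_one).mpr ⟨hb.1, hb.2.1⟩
  · exact (PySem.List.mem_pyRange_one).mpr ⟨hb.2.2.1, hb.2.2.2⟩
  · exact List.mem_map.mpr ⟨d, (PySem.List.mem_pyRange_one).mpr ⟨hd.1, hd.2⟩, rfl⟩

theorem stepB_elim {n : Int} {board : List (List Int)} {s : SState} {wt : Int × SState}
    (h : wt ∈ stepB n board s) : (wt.1 = 100 ∨ wt.1 = 600) ∧ wt.2 ∈ stateListB n := by
  rcases List.mem_filterMap.mp h with ⟨p, hp, hf⟩
  dsimp only at hf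
  split at hf
  case isTrue hb =>
    split at hf
    case isTrue => simp at hf
    case isFalse hcell =>
      injection hf with hf; subst hf
      constructor
      · dsimp only; split <;> simp
      · refine mem_stateListB ⟨hb.1, hb.2.1, hb.2.2.1, hb.2.2.2⟩ ?_
        unfold hOf; split <;> simp <;> omega
  case isFalse => simp at hf

theorem invB_updD {dist : SState → Option Int} (h : InvB dist) {t : SState} {v : Int}
    (hv : 0 ≤ v) : InvB (updD dist t v) := by
  intro s u hu
  unfold updD at hu
  split at hu
  · injection hu with hu; omega
  · exact h s u hu

theorem nlt_updD_none {n : Int} {dist : SState → Option Int} {t : SState} {v : Int}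
    (ht : dist t = none) (hmem : t ∈ stateListB n) :
    NLt (mB n (updD dist t v)) (mB n dist) := by
  refine Prod.Lex.left _ _ ?_
  refine countP_lt_of_flip _ _ _ ?_ t hmem ?_ ?_
  · intro x hx hx'
    by_cases hxt : x = t
    · subst hxt; simp [updD, ht]
    · simpa [updD, hxt] using hx'
  · simp [ht]
  · simp [updD]

theorem nlt_updD_lt {n : Int} {dist : SState → Option Int} {t : SState} {v old : Int}
    (ht : dist t = some old) (hmem : t ∈ stateListB n) (h0 : 0 ≤ v) (hlt : v < old) :
    NLt (mB n (updD dist t v)) (mB n dist) := by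
  have hnc : noneCount n (updD dist t v) = noneCount n dist := by
    refine List.countP_congr ?_
    intro x hx
    by_cases hxt : x = t
    · subst hxt; simp [updD, ht]
    · simp [updD, hxt]
  have hfs : finSum n (updD dist t v) < finSum n dist := by
    refine List.sum_lt_sum _ _ ?_ ⟨t, hmem, ?_⟩
    · intro x hx
      by_cases hxt : x = t
      · subst hxt; simp [updD, ht]; omega
      · simp [updD, hxt]
    · simp [updD, ht]; omega
  unfold mB NLt
  rw [hnc]
  exact Prod.Lex.right _ hfs

theorem decB_trans {n : Int} {a b c : (SState → Option Int) × Bool}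
    (h1 : DecB n a b) (h2 : DecB n b c) : DecB n a c := by
  rcases h1 with h1 | ⟨hf1, hl1⟩
  · rw [h1] at h2; exact h2
  · rcases h2 with h2 | ⟨hf2, hl2⟩
    · rw [h2]; exact Or.inr ⟨hf1, hl1⟩
    · exact Or.inr ⟨hf2, hl2.trans hl1⟩

theorem relax1_ok {n : Int} {cur : Int} (hcur : 0 ≤ cur) {wt : Int × SState}
    (hw : (wt.1 = 100 ∨ wt.1 = 600) ∧ wt.2 ∈ stateListB n)
    {st : (SState → Option Int) × Bool} (h : InvB st.1) :
    InvB (relax1 cur st wt).1 ∧ DecB n st (relax1 cur st wt) := by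
  have h0 : 0 ≤ cur + wt.1 := by rcases hw.1 with h1 | h1 <;> omega
  unfold relax1
  split
  case h_1 old hnone =>
    exact ⟨invB_updD h h0, Or.inr ⟨rfl, nlt_updD_none hnone hw.2⟩⟩
  case h_2 old hsome =>
    split
    case isTrue hlt =>
      exact ⟨invB_updD h h0, Or.inr ⟨rfl, nlt_updD_lt hsome hw.2 h0 hlt⟩⟩
    case isFalse => exact ⟨h, Or.inl rfl⟩

theorem foldl_relax1_ok {n : Int} {cur : Int} (hcur : 0 ≤ cur) :
    ∀ (wts : List (Int × SState)),
      (∀ wt ∈ wts, (wt.1 = 100 ∨ wt.1 = 600) ∧ wt.2 ∈ stateListB n) →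
      ∀ st, InvB st.1 →
        InvB (wts.foldl (relax1 cur) st).1 ∧ DecB n st (wts.foldl (relax1 cur) st) := by
  intro wts
  induction wts with
  | nil => intro _ st h; exact ⟨h, Or.inl rfl⟩
  | cons wt wts ih =>
    intro hws st h
    have h1 := relax1_ok (n := n) hcur (hws wt List.mem_cons_self) h
    have h2 := ih (fun w hw => hws w (List.mem_cons_of_mem _ hw)) _ h1.1
    exact ⟨h2.1, decB_trans h1.2 h2.2⟩

theorem relaxB_ok {n : Int} {board : List (List Int)}
    {st : (SState → Option Int) × Bool} (h : InvB st.1) (s : SState) :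
    InvB (relaxB n board st s).1 ∧ DecB n st (relaxB n board st s) := by
  unfold relaxB
  split
  case h_1 => exact ⟨h, Or.inl rfl⟩
  case h_2 cur hcur =>
    exact foldl_relax1_ok (h _ _ hcur) _ (fun wt hw => stepB_elim hw) st h

theorem foldl_relaxB_ok {n : Int} {board : List (List Int)} :
    ∀ (l : List SState) (st : (SState → Option Int) × Bool), InvB st.1 →
      InvB (l.foldl (relaxB n board) st).1 ∧ DecB n st (l.foldl (relaxB n board) st) := by
  intro l
  induction l with
  | nil => intro st h; exact ⟨h, Or.inl rfl⟩
  | cons s l ih =>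
    intro st h
    have h1 := relaxB_ok (n := n) (board := board) h s
    have h2 := ih _ h1.1
    exact ⟨h2.1, decB_trans h1.2 h2.2⟩

theorem roundB_dec {n : Int} {board : List (List Int)} {dist : SState → Option Int}
    (h : InvB dist) :
    InvB (roundB n board dist).1 ∧ DecB n (dist, false) (roundB n board dist) :=
  foldl_relaxB_ok _ _ h

-- iterate sweeps until a sweep changes nothing
def loopB (n : Int) (board : List (List Int)) (dist : SState → Option Int)
    (h : InvB dist) : SState → Option Int :=
  if hc : (roundB n board dist).2 = true then
    loopB n board (roundB n board dist).1 (roundB_dec h).1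
  else (roundB n board dist).1
  termination_by mB n dist
  decreasing_by
    rcases (roundB_dec h).2 with heq | ⟨_, hlt⟩
    · rw [heq] at hc; simp at hc
    · exact hlt

def initDist : SState → Option Int := fun s => if s = (0, 0, 2) then some 0 else none

theorem initDist_inv : InvB initDist := by
  intro s v hv
  unfold initDist at hv
  split at hv <;> simp_all

-- best = min over the three direction layers at (n-1, n-1), default int(1e9)
def bestOf (n : Int) (dist : SState → Option Int) : Int :=
  (PySem.List.pyRange 0 3 1).foldl (fun b d =>
    match dist (n - 1, n - 1, d) with
    | none => b
    | some v => if v < b then v else b) 1000000000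

def solution_alt (board : List (List Int)) : Int :=
  let n : Int := board.length
  bestOf n (loopB n board initDist initDist_inv)

-- ===== PRECONDITION & SPEC =====
-- row i of the board, [] when absent, and its length
def rowLen (board : List (List Int)) (i : Int) : Int :=
  ((PySem.List.pyGet? board i).getD []).length

-- Pre_ excludes the empty board (A raises IndexError) and ragged boards (some row
-- shorter than the board) unless the two cells next to the start exist and are
-- walls, in which case A returns int(1e9) (or 0 for n = 1) without ever indexing
-- into a short row.  On some other ragged boards walls further out also stop the
-- search before a short-row access and A still returns — see the cited example.
def Pre_solution (board : List (List Int)) : Prop :=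
  board ≠ [] ∧
    ((∀ row ∈ board, board.length ≤ row.length) ∨
      (1 < (board.length : Int) →
        1 < rowLen board 0 ∧ cellAt board 0 1 ≠ 0 ∧
        0 < rowLen board 1 ∧ cellAt board 1 0 ≠ 0))
instance (board : List (List Int)) : Decidable (Pre_solution board) := by
  unfold Pre_solution; infer_instance

def pvWitness_solution : List (List Int) := [[0]]

def Spec_solution (board : List (List Int)) (out : Int) : Prop := out = solution_alt board
instance (board : List (List Int)) (out : Int) : Decidable (Spec_solution board out) := by
  unfold Spec_solution; infer_instance

-- ===== CLAIM (what is proved, stated in full; the proofs are below) =====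
def Claim_equal_solution : Prop := ∀ (board : List (List Int)), Dom_solution board →
  Pre_solution board → Spec_solution board (solution board)

-- ===== LEMMAS AND PROOFS =====

-- ---------- graph-theoretic layer ----------

def GoalS (n : Int) (s : SState) : Prop := s.1 = n - 1 ∧ s.2.1 = n - 1

-- cost-annotated walks in the full move graph (what B's relaxations follow)
inductive ReachF (n : Int) (board : List (List Int)) : SState → Int → Prop
  | start : ReachF n board (0, 0, 2) 0
  | step {s c w t} : ReachF n board s c → (w, t) ∈ stepB n board s → ReachF n board t (c + w)

-- walks that never leave the goal cell (A never relaxes out of the goal)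
inductive ReachP (n : Int) (board : List (List Int)) : SState → Int → Prop
  | start : ReachP n board (0, 0, 2) 0
  | step {s c w t} : ReachP n board s c → ¬ GoalS n s → (w, t) ∈ stepB n board s →
      ReachP n board t (c + w)

theorem reachP_F {n : Int} {board : List (List Int)} {s : SState} {c : Int}
    (h : ReachP n board s c) : ReachF n board s c := by
  induction h with
  | start => exact ReachF.start
  | step _ _ hst ih => exact ih.step hst

theorem reachF_prefix {n : Int} {board : List (List Int)} {t : SState} {c : Int}
    (h : ReachF n board t c) :
    ReachP n board t c ∨ ∃ t' c', GoalS n t' ∧ c' ≤ c ∧ ReachP n board t' c' := by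
  induction h with
  | start => exact Or.inl ReachP.start
  | step hs hst ih =>
    rename_i s c' w t'
    have hw : w = 100 ∨ w = 600 := (stepB_elim hst).1
    rcases ih with hP | ⟨t'', c'', hg, hle, hP⟩
    · by_cases hgs : GoalS n s
      · exact Or.inr ⟨s, c', hgs, by omega, hP⟩
      · exact Or.inl (hP.step hgs hst)
    · exact Or.inr ⟨t'', c'', hg, by omega, hP⟩

theorem mem_stateListB_elim {n : Int} {s : SState} (h : s ∈ stateListB n) :
    0 ≤ s.1 ∧ s.1 < n ∧ 0 ≤ s.2.1 ∧ s.2.1 < n ∧ 0 ≤ s.2.2 ∧ s.2.2 < 3 := by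
  rcases List.mem_flatMap.mp h with ⟨x, hx, h2⟩
  rcases List.mem_flatMap.mp h2 with ⟨y, hy, h3⟩
  rcases List.mem_map.mp h3 with ⟨d, hd, h4⟩
  rw [PySem.List.mem_pyRange_one] at hx hy
  rw [PySem.List.mem_pyRange_one] at hd
  subst h4
  exact ⟨hx.1, hx.2, hy.1, hy.2, hd.1, hd.2⟩

theorem reachF_mem {n : Int} {board : List (List Int)} (hn : 1 ≤ n) {s : SState} {c : Int}
    (h : ReachF n board s c) : s ∈ stateListB n := by
  induction h with
  | start => exact mem_stateListB ⟨le_rfl, hn, le_rfl, hn⟩ (by omega)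
  | step _ hst _ => exact (stepB_elim hst).2

-- ---------- facts about leE / insertSorted ----------

theorem leE_cost {a b : EEnt} (h : leE a b = true) : a.1 ≤ b.1 := by
  simp only [leE, decide_eq_true_eq] at h; omega

theorem leE_total (a b : EEnt) : leE a b = true ∨ leE b a = true := by
  simp only [leE, decide_eq_true_eq]; omega

theorem leE_trans {a b c : EEnt} (h1 : leE a b = true) (h2 : leE b c = true) :
    leE a c = true := by
  simp only [leE, decide_eq_true_eq] at h1 h2 ⊢; omega

theorem insertSorted_pairwise {e : EEnt} {l : List EEnt}
    (h : l.Pairwise (fun a b => leE a b = true)) :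
    (insertSorted e l).Pairwise (fun a b => leE a b = true) := by
  induction l with
  | nil => simp [insertSorted]
  | cons x xs ih =>
    rcases List.pairwise_cons.mp h with ⟨hx, hxs⟩
    by_cases hle : leE e x = true
    · simp only [insertSorted, hle, if_true]
      refine List.pairwise_cons.mpr ⟨?_, h⟩
      intro b hb
      rcases List.mem_cons.mp hb with hb | hb
      · subst hb; exact hle
      · exact leE_trans hle (hx b hb)
    · simp only [insertSorted, hle]
      refine List.pairwise_cons.mpr ⟨?_, ih hxs⟩
      intro b hb
      rcases List.mem_cons.mp ((insertSorted_perm e xs).mem_iff.mp hb) with hb | hb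
      · subst hb
        rcases leE_total b x with h' | h'
        · exact absurd h' hle
        · exact h'
      · exact hx b hb
    
theorem pushQ_pairwise {n : Int} {board : List (List Int)} {vis : List SState} {c : Int}
    {s : SState} {rest : List EEnt} (h : rest.Pairwise (fun a b => leE a b = true)) :
    (pushQ n board vis c s rest).Pairwise (fun a b => leE a b = true) := by
  unfold pushQ
  generalize pushCands n board vis c s = l
  induction l generalizing rest with
  | nil => exact h
  | cons e l ih => exact ih (insertSorted_pairwise h)

theorem mem_pushQ {n : Int} {board : List (List Int)} {vis : List SState} {c : Int}
    {s : SState} {rest : List EEnt} {e : EEnt} :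
    e ∈ pushQ n board vis c s rest ↔ e ∈ pushCands n board vis c s ∨ e ∈ rest := by
  unfold pushQ
  rw [(foldl_insertSorted_perm _ _).mem_iff, List.mem_append]

theorem mem_mark {s x : SState} {v : List SState} : x ∈ mark s v ↔ x = s ∨ x ∈ v := by
  unfold mark
  split
  · constructor
    · exact fun h => Or.inr h
    · rintro (h | h)
      · subst h; assumption
      · exact h
  · simp [List.mem_cons]

-- the two sides enumerate the same moves: A's push list = B's step list filtered by visited
theorem pushCands_iff {n : Int} {board : List (List Int)} {vis : List SState} {c : Int}
    {s : SState} {e : EEnt} :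
    e ∈ pushCands n board vis c s ↔
      ∃ w t, e = (c + w, t) ∧ (w, t) ∈ stepB n board s ∧ t ∉ vis := by
  constructor
  · intro he
    rcases List.mem_filterMap.mp he with ⟨p, hp, hf⟩
    dsimp only at hf
    split at hf
    case isTrue hb =>
      split at hf
      case isTrue => simp at hf
      case isFalse hv =>
        split at hf
        case isTrue => simp at hf
        case isFalse hcell =>
          injection hf with hf
          refine ⟨(if (s.2.2 = 0 ∧ hOf p = 1) ∨ (s.2.2 = 1 ∧ ¬(hOf p = 1)) then 600 else 100),
                  (s.1 + p.1, s.2.1 + p.2, hOf p), hf.symm, ?_, hv⟩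
          refine List.mem_filterMap.mpr ⟨p, hp, ?_⟩
          dsimp only
          rw [if_pos hb, if_neg hcell]
          congr 1
          have hh : hOf p = 0 ∨ hOf p = 1 := by unfold hOf; split <;> simp
          rcases hh with hh | hh <;> rw [hh] <;> split_ifs <;> first | rfl | omega
    case isFalse => simp at hf
  · rintro ⟨w, t, rfl, hst, hnv⟩
    rcases List.mem_filterMap.mp hst with ⟨p, hp, hf⟩
    dsimp only at hf
    split at hf
    case isTrue hb =>
      split at hf
      case isTrue => simp at hf
      case isFalse hcell =>
        injection hf with hf
        refine List.mem_filterMap.mpr ⟨p, hp, ?_⟩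
        dsimp only
        rw [if_pos hb]
        have ht : t = (s.1 + p.1, s.2.1 + p.2, hOf p) := by
          have := congrArg Prod.snd hf; simpa using this.symm
        rw [if_neg (by rw [← ht]; exact hnv), if_neg hcell]
        have hw : w = (if s.2.2 = 1 - hOf p then (600:Int) else 100) := by
          have := congrArg Prod.fst hf; simpa using this.symm
        rw [ht, hw]
        congr 1
        have hh : hOf p = 0 ∨ hOf p = 1 := by unfold hOf; split <;> simp
        rcases hh with hh | hh <;> rw [hh] <;> split_ifs <;> first | rfl | omega
    case isFalse => simp at hf

-- ---------- the ghost pop history and its invariant ----------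

def chainLe (P : List EEnt) : Prop := P.Pairwise (fun a b => a.1 ≤ b.1)

-- every relaxation a popped non-goal entry owed has been recorded: its target was
-- already visited by then, or the pushed entry is (still) in P or in the heap
def CLO (n : Int) (board : List (List Int)) (P q : List EEnt) : Prop :=
  ∀ P₁ c s P₂, P = P₁ ++ (c, s) :: P₂ → ¬ GoalS n s →
    ∀ w t, (w, t) ∈ stepB n board s →
      (t ∈ P₁.map (·.2) ∨ t = s) ∨ (c + w, t) ∈ P ∨ (c + w, t) ∈ q

structure GoodA (n : Int) (board : List (List Int)) (P : List EEnt) (visited : List SState)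
    (q : List EEnt) (answer : Int) : Prop where
  g1 : ∀ s, s ∈ visited ↔ s ∈ P.map (·.2)
  g2 : chainLe P
  g2b : ∀ p ∈ P, ∀ e ∈ q, p.1 ≤ e.1
  g3 : q.Pairwise (fun a b => leE a b = true)
  g4 : CLO n board P q
  g5p : ∀ e ∈ P, ReachP n board e.2 e.1
  g5q : ∀ e ∈ q, ReachP n board e.2 e.1
  g6 : ∀ e ∈ P, GoalS n e.2 → answer ≤ e.1
  g6b : answer ≤ 1000000000
  g7 : ((0:Int), ((0:Int), (0:Int), (2:Int))) ∈ P ∨ ((0:Int), ((0:Int), (0:Int), (2:Int))) ∈ q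

-- with an empty heap the history accounts for every pruned walk
theorem hist_complete {n : Int} {board : List (List Int)} {P : List EEnt}
    (hchain : chainLe P) (hclo : CLO n board P [])
    (hstart : ((0:Int), ((0:Int), (0:Int), (2:Int))) ∈ P) :
    ∀ t c, ReachP n board t c → ∃ c', c' ≤ c ∧ (c', t) ∈ P := by
  intro t c h
  induction h with
  | start => exact ⟨0, le_rfl, hstart⟩
  | step hs hgoal hstep ih =>
    rename_i s c₁ w t'
    rcases ih with ⟨c₁', hle, hmem⟩
    rcases List.append_of_mem hmem with ⟨P₁, P₂, hPeq⟩
    have hw : w = 100 ∨ w = 600 := (stepB_elim hstep).1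
    rcases hclo P₁ c₁' s P₂ hPeq hgoal w t' hstep with (hin | hts) | hP | hq
    · rcases List.mem_map.mp hin with ⟨e, heP₁, het⟩
      have hec : e.1 ≤ c₁' := by
        have hch := hPeq ▸ hchain
        exact (List.pairwise_append.mp hch).2.2 e heP₁ (c₁', s) List.mem_cons_self
      refine ⟨e.1, by omega, ?_⟩
      have : e ∈ P := hPeq ▸ List.mem_append_left _ heP₁
      rwa [show (e.1, t') = e by rw [← het]] 
    · exact ⟨c₁', by omega, by rw [hts]; exact hmem⟩
    · exact ⟨c₁' + w, by omega, hP⟩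
    · simp at hq

-- last-entry decompositions of P ++ [a]
theorem concat_decomp {P P₁ P₂ : List EEnt} {a x : EEnt}
    (h : P ++ [a] = P₁ ++ x :: P₂) :
    (P₂ = [] ∧ x = a ∧ P₁ = P) ∨ (∃ P₂', P₂ = P₂' ++ [a] ∧ P = P₁ ++ x :: P₂') := by
  rcases P₂.eq_nil_or_concat with h2 | ⟨ys, y, h2⟩
  · subst h2
    have := List.append_inj h (by
      have := congrArg List.length h
      simp at this; omega)
    exact Or.inl ⟨rfl, by simpa using (List.cons.inj this.2).1.symm, this.1.symm⟩
  · subst h2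
    have h' : P ++ [a] = (P₁ ++ x :: ys) ++ [y] := by simpa using h
    have := List.append_inj h' (by have := congrArg List.length h'; simp [List.length_append] at this ⊢; omega)
    rcases this with ⟨h3, h4⟩
    have hy : a = y := by simpa using h4
    exact Or.inr ⟨ys, by rw [hy, List.concat_eq_append], h3⟩

-- ---------- the two bounds on A's loop ----------

theorem loopA_ge (n : Int) (board : List (List Int)) (best : Int)
    (hbest : ∀ t c, ReachP n board t c → GoalS n t → best ≤ c) :
    ∀ (visited : List SState) (q : List EEnt) (answer : Int)
      (hq : ∀ e ∈ q, e.2 ∈ spaceA n),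
      (∀ e ∈ q, ReachP n board e.2 e.1) → best ≤ answer →
      best ≤ loopA n board visited q answer hq := by
  intro visited q answer hq
  induction visited, q, answer, hq using loopA.induct n board with
  | case1 visited answer x hx => intro _ h; rw [loopA]; exact h
  | case2 visited answer c s rest hq hg hq2 ih =>
    intro hre hans
    rw [loopA, if_pos hg]
    refine ih ?_ ?_
    · exact fun e he => hre e (List.mem_cons_of_mem _ he)
    · exact le_min hans (hbest s c (hre (c, s) List.mem_cons_self) hg)
  | case3 visited answer c s rest hq hg hq2 ih =>
    intro hre hans
    rw [loopA, if_neg hg]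
    refine ih ?_ hans
    intro e he
    rcases mem_pushQ.mp he with h | h
    · rcases pushCands_iff.mp h with ⟨w, t, rfl, hst, _⟩
      exact (hre (c, s) List.mem_cons_self).step hg hst
    · exact hre e (List.mem_cons_of_mem _ h)

theorem goodA_pop_goal {n : Int} {board : List (List Int)} {P : List EEnt}
    {visited : List SState} {c : Int} {s : SState} {rest : List EEnt} {answer : Int}
    (hg : GoodA n board P visited ((c, s) :: rest) answer) (hgoal : GoalS n s) :
    GoodA n board (P ++ [(c, s)]) (mark s visited) rest (min answer c) := by
  obtain ⟨g1, g2, g2b, g3, g4, g5p, g5q, g6, g6b, g7⟩ := hg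
  have hheadle : ∀ e ∈ rest, c ≤ e.1 :=
    fun e he => leE_cost ((List.pairwise_cons.mp g3).1 e he)
  have hPle : ∀ p ∈ P, p.1 ≤ c := fun p hp => g2b p hp (c, s) List.mem_cons_self
  refine ⟨?_, ?_, ?_, ?_, ?_, ?_, ?_, ?_, ?_, ?_⟩
  · intro x
    rw [mem_mark, List.map_append]
    simp only [List.mem_append, List.map_cons, List.map_nil, List.mem_cons,
      List.not_mem_nil, or_false]
    rw [g1 x]
    tauto
  · unfold chainLe
    rw [List.pairwise_append]
    refine ⟨g2, by simp, ?_⟩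
    intro a ha b hb
    simp only [List.mem_singleton] at hb
    subst hb
    exact hPle a ha
  · intro p hp e he
    rcases List.mem_append.mp hp with hp | hp
    · exact g2b p hp e (List.mem_cons_of_mem _ he)
    · simp only [List.mem_singleton] at hp
      subst hp
      exact hheadle e he
  · exact (List.pairwise_cons.mp g3).2
  · intro P₁ c₀ s₀ P₂ hdec hng w t hst
    rcases concat_decomp hdec with ⟨h2, hxa, h1⟩ | ⟨P₂', h2, hPold⟩
    · injection hxa with h4 h5
      subst h5
      exact absurd hgoal hng
    · rcases g4 P₁ c₀ s₀ P₂' hPold hng w t hst with h | h | h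
      · exact Or.inl h
      · exact Or.inr (Or.inl (List.mem_append_left _ h))
      · rcases List.mem_cons.mp h with h | h
        · exact Or.inr (Or.inl (List.mem_append_right _ (by simp [h])))
        · exact Or.inr (Or.inr h)
  · intro e he
    rcases List.mem_append.mp he with he | he
    · exact g5p e he
    · simp only [List.mem_singleton] at he
      subst he
      exact g5q (c, s) List.mem_cons_self
  · exact fun e he => g5q e (List.mem_cons_of_mem _ he)
  · intro e he hge
    rcases List.mem_append.mp he with he | he
    · exact le_trans (min_le_left _ _) (g6 e he hge)
    · simp only [List.mem_singleton] at he
      subst he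
      exact min_le_right _ _
  · exact le_trans (min_le_left _ _) g6b
  · rcases g7 with h | h
    · exact Or.inl (List.mem_append_left _ h)
    · rcases List.mem_cons.mp h with h | h
      · exact Or.inl (List.mem_append_right _ (by simp [h]))
      · exact Or.inr h

theorem goodA_pop_relax {n : Int} {board : List (List Int)} {P : List EEnt}
    {visited : List SState} {c : Int} {s : SState} {rest : List EEnt} {answer : Int}
    (hg : GoodA n board P visited ((c, s) :: rest) answer) (hgoal : ¬ GoalS n s) :
    GoodA n board (P ++ [(c, s)]) (mark s visited)
      (pushQ n board (mark s visited) c s rest) answer := by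
  obtain ⟨g1, g2, g2b, g3, g4, g5p, g5q, g6, g6b, g7⟩ := hg
  have hheadle : ∀ e ∈ rest, c ≤ e.1 :=
    fun e he => leE_cost ((List.pairwise_cons.mp g3).1 e he)
  have hPle : ∀ p ∈ P, p.1 ≤ c := fun p hp => g2b p hp (c, s) List.mem_cons_self
  have hpush : ∀ e ∈ pushCands n board (mark s visited) c s, c ≤ e.1 := by
    intro e he
    rcases pushCands_iff.mp he with ⟨w, t, rfl, hst, _⟩
    have := (stepB_elim hst).1
    simp only
    omega
  refine ⟨?_, ?_, ?_, ?_, ?_, ?_, ?_, ?_, g6b, ?_⟩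
  · intro x
    rw [mem_mark, List.map_append]
    simp only [List.mem_append, List.map_cons, List.map_nil, List.mem_cons,
      List.not_mem_nil, or_false]
    rw [g1 x]
    tauto
  · unfold chainLe
    rw [List.pairwise_append]
    refine ⟨g2, by simp, ?_⟩
    intro a ha b hb
    simp only [List.mem_singleton] at hb
    subst hb
    exact hPle a ha
  · intro p hp e he
    rcases mem_pushQ.mp he with he | he
    · have hce := hpush e he
      rcases List.mem_append.mp hp with hp | hp
      · exact le_trans (hPle p hp) hce
      · simp only [List.mem_singleton] at hp
        subst hp
        exact hce
    · rcases List.mem_append.mp hp with hp | hp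
      · exact g2b p hp e (List.mem_cons_of_mem _ he)
      · simp only [List.mem_singleton] at hp
        subst hp
        exact hheadle e he
  · exact pushQ_pairwise (List.pairwise_cons.mp g3).2
  · intro P₁ c₀ s₀ P₂ hdec hng w t hst
    rcases concat_decomp hdec with ⟨h2, hxa, h1⟩ | ⟨P₂', h2, hPold⟩
    · injection hxa with h4 h5
      subst h1
      rw [h4, h5]
      rw [h5] at hst
      by_cases hv : t ∈ mark s visited
      · rcases mem_mark.mp hv with h | h
        · exact Or.inl (Or.inr h)
        · exact Or.inl (Or.inl ((g1 t).mp h))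
      · exact Or.inr (Or.inr (mem_pushQ.mpr (Or.inl (pushCands_iff.mpr ⟨w, t, rfl, hst, hv⟩))))
    · rcases g4 P₁ c₀ s₀ P₂' hPold hng w t hst with h | h | h
      · exact Or.inl h
      · exact Or.inr (Or.inl (List.mem_append_left _ h))
      · rcases List.mem_cons.mp h with h | h
        · exact Or.inr (Or.inl (List.mem_append_right _ (by simp [h])))
        · exact Or.inr (Or.inr (mem_pushQ.mpr (Or.inr h)))
  · intro e he
    rcases List.mem_append.mp he with he | he
    · exact g5p e he
    · simp only [List.mem_singleton] at he
      subst he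
      exact g5q (c, s) List.mem_cons_self
  · intro e he
    rcases mem_pushQ.mp he with he | he
    · rcases pushCands_iff.mp he with ⟨w, t, rfl, hst, _⟩
      exact (g5q (c, s) List.mem_cons_self).step hgoal hst
    · exact g5q e (List.mem_cons_of_mem _ he)
  · intro e he hge
    rcases List.mem_append.mp he with he | he
    · exact g6 e he hge
    · simp only [List.mem_singleton] at he
      subst he
      exact absurd hge hgoal
  · rcases g7 with h | h
    · exact Or.inl (List.mem_append_left _ h)
    · rcases List.mem_cons.mp h with h | h
      · exact Or.inl (List.mem_append_right _ (by simp [h]))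
      · exact Or.inr (mem_pushQ.mpr (Or.inr h))

theorem loopA_le (n : Int) (board : List (List Int)) :
    ∀ (visited : List SState) (q : List EEnt) (answer : Int)
      (hq : ∀ e ∈ q, e.2 ∈ spaceA n) (P : List EEnt),
      GoodA n board P visited q answer →
      (∀ t c, ReachP n board t c →  GoalS n t →
        loopA n board visited q answer hq ≤ c) ∧
      loopA n board visited q answer hq ≤ 1000000000 := by
  intro visited q answer hq
  induction visited, q, answer, hq using loopA.induct n board with
  | case1 visited answer x hx =>
    intro P hgd
    rw [loopA]
    constructor
    · intro t c hR hgoal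
      have hstart : ((0:Int), ((0:Int), (0:Int), (2:Int))) ∈ P := by
        rcases hgd.g7 with h | h
        · exact h
        · simp at h
      rcases hist_complete hgd.g2 hgd.g4 hstart t c hR with ⟨c', hle, hmem⟩
      exact le_trans (hgd.g6 _ hmem hgoal) hle
    · exact hgd.g6b
  | case2 visited answer c s rest hq hg hq2 ih =>
    intro P hgd
    rw [loopA, if_pos hg]
    exact ih (P ++ [(c, s)]) (goodA_pop_goal hgd hg)
  | case3 visited answer c s rest hq hg hq2 ih =>
    intro P hgd
    rw [loopA, if_neg hg]
    exact ih (P ++ [(c, s)]) (goodA_pop_relax hgd hg)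

-- ---------- B's final table: reachability facts ----------

def AchB (n : Int) (board : List (List Int)) (dist : SState → Option Int) : Prop :=
  ∀ s v, dist s = some v → ReachF n board s v
def D2B (dist : SState → Option Int) : Prop := ∀ s : SState, s.2.2 = 2 → dist s = initDist s

theorem stepB_d01 {n : Int} {board : List (List Int)} {s : SState} {wt : Int × SState}
    (h : wt ∈ stepB n board s) : wt.2.2.2 = 0 ∨ wt.2.2.2 = 1 := by
  rcases List.mem_filterMap.mp h with ⟨p, hp, hf⟩
  dsimp only at hf
  split at hf
  case isTrue =>
    split at hf
    case isTrue => simp at hf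
    case isFalse =>
      injection hf with hf; subst hf
      unfold hOf; split <;> simp
  case isFalse => simp at hf

theorem relax1_pres {n : Int} {board : List (List Int)} {s : SState} {cur : Int}
    (hreach : ReachF n board s cur) {wt : Int × SState} (hst : wt ∈ stepB n board s)
    {st : (SState → Option Int) × Bool} (ha : AchB n board st.1) (hd : D2B st.1) :
    AchB n board (relax1 cur st wt).1 ∧ D2B (relax1 cur st wt).1 := by
  have hupd : AchB n board (updD st.1 wt.2 (cur + wt.1)) ∧ D2B (updD st.1 wt.2 (cur + wt.1)) := by
    constructor
    · intro x v hv
      unfold updD at hv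
      split at hv
      · rename_i hx
        injection hv with hv
        subst hx; rw [← hv]
        exact hreach.step (by rwa [show ((wt.1, wt.2) : Int × SState) = wt from rfl])
      · exact ha x v hv
    · intro x hx2
      unfold updD
      split
      · rename_i hx
        subst hx
        rcases stepB_d01 hst with h01 | h01 <;> omega
      · exact hd x hx2
  unfold relax1
  split
  · exact hupd
  · split
    · exact hupd
    · exact ⟨ha, hd⟩

theorem foldl_relax1_pres {n : Int} {board : List (List Int)} {s : SState} {cur : Int}
    (hreach : ReachF n board s cur) :
    ∀ (wts : List (Int × SState)), (∀ wt ∈ wts, wt ∈ stepB n board s) →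
      ∀ st, AchB n board st.1 → D2B st.1 →
        AchB n board (wts.foldl (relax1 cur) st).1 ∧ D2B (wts.foldl (relax1 cur) st).1 := by
  intro wts
  induction wts with
  | nil => intro _ st ha hd; exact ⟨ha, hd⟩
  | cons wt wts ih =>
    intro hsub st ha hd
    have h1 := relax1_pres hreach (hsub wt List.mem_cons_self) ha hd
    exact ih (fun w hw => hsub w (List.mem_cons_of_mem _ hw)) _ h1.1 h1.2

theorem roundB_pres {n : Int} {board : List (List Int)} {dist : SState → Option Int}
    (ha : AchB n board dist) (hd : D2B dist) :
    AchB n board (roundB n board dist).1 ∧ D2B (roundB n board dist).1 := by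
  unfold roundB
  generalize hst : ((dist, false) : (SState → Option Int) × Bool) = st
  have ha' : AchB n board st.1 := by rw [← hst]; exact ha
  have hd' : D2B st.1 := by rw [← hst]; exact hd
  clear hst ha hd
  generalize stateListB n = l
  induction l generalizing st with
  | nil => exact ⟨ha', hd'⟩
  | cons s l ih =>
    have h1 : AchB n board (relaxB n board st s).1 ∧ D2B (relaxB n board st s).1 := by
      unfold relaxB
      split
      case h_1 => exact ⟨ha', hd'⟩
      case h_2 cur hcur =>
        exact foldl_relax1_pres (ha' s cur hcur) _ (fun wt hw => hw) st ha' hd'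
    exact ih _ h1.1 h1.2

theorem loopB_pres {n : Int} {board : List (List Int)} :
    ∀ (dist : SState → Option Int) (h : InvB dist), AchB n board dist → D2B dist →
      AchB n board (loopB n board dist h) ∧ D2B (loopB n board dist h) ∧
        roundB n board (loopB n board dist h) = (loopB n board dist h, false) := by
  intro dist h
  induction dist, h using loopB.induct n board with
  | case1 dist h hc ih =>
    intro ha hd
    rw [loopB.eq_def, dif_pos hc]
    have hp := roundB_pres ha hd
    exact ih hp.1 hp.2
  | case2 dist h hc =>
    intro ha hd
    rw [loopB.eq_def, dif_neg hc]
    have hp := roundB_pres (n := n) (board := board) ha hd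
    have hfix : roundB n board dist = (dist, false) := by
      rcases (roundB_dec h).2 with heq | ⟨hf, _⟩
      · exact heq
      · exact absurd hf hc
    refine ⟨hp.1, hp.2, ?_⟩
    rw [hfix]
    simpa using hfix

-- extraction of the fixpoint inequalities from an unchanged sweep
theorem foldl_relax1_false {cur : Int} :
    ∀ (wts : List (Int × SState)) (st : (SState → Option Int) × Bool),
      (wts.foldl (relax1 cur) st).2 = false →
      st.2 = false ∧ wts.foldl (relax1 cur) st = st ∧
        ∀ wt ∈ wts, ∃ old, st.1 wt.2 = some old ∧ ¬ cur + wt.1 < old := by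
  intro wts
  induction wts with
  | nil => intro st h; exact ⟨h, rfl, by simp⟩
  | cons wt wts ih =>
    intro st h
    rw [List.foldl_cons] at h
    have hstep := ih (relax1 cur st wt) h
    have hone : relax1 cur st wt = st ∧ ∃ old, st.1 wt.2 = some old ∧ ¬ cur + wt.1 < old := by
      have hflag : (relax1 cur st wt).2 = false := hstep.1
      unfold relax1 at hflag ⊢
      split at hflag
      · simp at hflag
      · rename_i old hold
        split at hflag
        · simp at hflag
        · rename_i hlt
          exact ⟨by rw [if_neg hlt], old, hold, hlt⟩
    rcases hone with ⟨heq, old, hold, hlt⟩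
    rw [List.foldl_cons, heq]
    rw [heq] at hstep
    refine ⟨hstep.1, hstep.2.1, ?_⟩
    intro w hw
    rcases List.mem_cons.mp hw with hw | hw
    · subst hw; exact ⟨old, hold, hlt⟩
    · exact hstep.2.2 w hw

theorem foldl_relaxB_false {n : Int} {board : List (List Int)} :
    ∀ (l : List SState) (st : (SState → Option Int) × Bool),
      (l.foldl (relaxB n board) st).2 = false →
      st.2 = false ∧ l.foldl (relaxB n board) st = st ∧
        ∀ s ∈ l, ∀ cur, st.1 s = some cur → ∀ wt ∈ stepB n board s,
          ∃ old, st.1 wt.2 = some old ∧ ¬ cur + wt.1 < old := by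
  intro l
  induction l with
  | nil => intro st h; exact ⟨h, rfl, by simp⟩
  | cons s l ih =>
    intro st h
    rw [List.foldl_cons] at h
    have hstep := ih (relaxB n board st s) h
    have hone : relaxB n board st s = st ∧
        ∀ cur, st.1 s = some cur → ∀ wt ∈ stepB n board s,
          ∃ old, st.1 wt.2 = some old ∧ ¬ cur + wt.1 < old := by
      have hflag : (relaxB n board st s).2 = false := hstep.1
      rcases hd : st.1 s with _ | cur
      · have heq0 : relaxB n board st s = st := by unfold relaxB; rw [hd]
        refine ⟨heq0, ?_⟩
        intro cur hcur
        exact absurd hcur (by simp)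
      · have heq1 : relaxB n board st s = (stepB n board s).foldl (relax1 cur) st := by
          unfold relaxB; rw [hd]
        rw [heq1] at hflag
        have hinner := foldl_relax1_false _ _ hflag
        refine ⟨by rw [heq1]; exact hinner.2.1, ?_⟩
        intro cur' hcur'
        injection hcur' with hcur'
        subst hcur'
        exact hinner.2.2
    rcases hone with ⟨heq, hfacts⟩
    rw [List.foldl_cons, heq]
    rw [heq] at hstep
    refine ⟨hstep.1, hstep.2.1, ?_⟩
    intro s' hs'
    rcases List.mem_cons.mp hs' with hs' | hs'
    · subst hs'; exact hfacts
    · exact hstep.2.2 s' hs'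

theorem noimp_of_fix {n : Int} {board : List (List Int)} {d : SState → Option Int}
    (hfix : roundB n board d = (d, false)) :
    ∀ s ∈ stateListB n, ∀ cur, d s = some cur → ∀ wt ∈ stepB n board s,
      ∃ u, d wt.2 = some u ∧ u ≤ cur + wt.1 := by
  have h := foldl_relaxB_false (n := n) (board := board) (stateListB n) (d, false)
      (by unfold roundB at hfix; rw [hfix])
  intro s hs cur hcur wt hwt
  rcases h.2.2 s hs cur hcur wt hwt with ⟨old, hold, hlt⟩
  exact ⟨old, hold, by omega⟩

theorem reach_ub {n : Int} {board : List (List Int)} {d : SState → Option Int}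
    (hn : 1 ≤ n) (hfix : roundB n board d = (d, false)) (hd2 : D2B d) :
    ∀ s c, ReachF n board s c → ∃ u, d s = some u ∧ u ≤ c := by
  intro s c h
  induction h with
  | start =>
    refine ⟨0, ?_, le_rfl⟩
    have := hd2 (0, 0, 2) rfl
    rw [this]
    simp [initDist]
  | step hs hst ih =>
    rename_i s' c' w t
    rcases ih with ⟨u, hdu, hle⟩
    have hmem : s' ∈ stateListB n := reachF_mem hn hs
    rcases noimp_of_fix hfix s' hmem u hdu _ hst with ⟨u', hdu', hle'⟩
    exact ⟨u', hdu', by omega⟩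

-- ---------- the final three-way minimum ----------

theorem pyRange3 : PySem.List.pyRange 0 3 1 = [0, 1, 2] := by decide

def bstep (n : Int) (dist : SState → Option Int) (b d : Int) : Int :=
  match dist (n - 1, n - 1, d) with
  | none => b
  | some v => if v < b then v else b

theorem bestOf_eq (n : Int) (dist : SState → Option Int) :
    bestOf n dist = bstep n dist (bstep n dist (bstep n dist 1000000000 0) 1) 2 := by
  unfold bestOf bstep
  rw [pyRange3]
  rfl

theorem bstep_le_b {n : Int} {dist : SState → Option Int} {b d : Int} :
    bstep n dist b d ≤ b := by
  unfold bstep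
  split
  · exact le_rfl
  · split_ifs <;> omega

theorem bstep_le_v {n : Int} {dist : SState → Option Int} {b d v : Int}
    (h : dist (n - 1, n - 1, d) = some v) : bstep n dist b d ≤ v := by
  simp only [bstep, h]
  split_ifs <;> omega

theorem bstep_cases {n : Int} {dist : SState → Option Int} {b d : Int} :
    bstep n dist b d = b ∨
      ∃ v, dist (n - 1, n - 1, d) = some v ∧ bstep n dist b d = v := by
  unfold bstep
  split
  · exact Or.inl rfl
  · rename_i v hv
    by_cases hlt : v < b
    · exact Or.inr ⟨v, hv, if_pos hlt⟩
    · exact Or.inl (if_neg hlt)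

theorem bestOf_le {n : Int} {dist : SState → Option Int} {dd v : Int}
    (hdd : dd = 0 ∨ dd = 1 ∨ dd = 2) (hd : dist (n - 1, n - 1, dd) = some v) :
    bestOf n dist ≤ v := by
  rw [bestOf_eq]
  rcases hdd with rfl | rfl | rfl
  · exact le_trans bstep_le_b (le_trans bstep_le_b (bstep_le_v hd))
  · exact le_trans bstep_le_b (bstep_le_v hd)
  · exact bstep_le_v hd

theorem bestOf_le_top (n : Int) (dist : SState → Option Int) :
    bestOf n dist ≤ 1000000000 := by
  rw [bestOf_eq]
  exact le_trans bstep_le_b (le_trans bstep_le_b bstep_le_b)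

theorem bestOf_cases (n : Int) (dist : SState → Option Int) :
    bestOf n dist = 1000000000 ∨
      ∃ dd v, (dd = 0 ∨ dd = 1 ∨ dd = 2) ∧ dist (n - 1, n - 1, dd) = some v ∧
        bestOf n dist = v := by
  rw [bestOf_eq]
  rcases bstep_cases (n := n) (dist := dist) (b := bstep n dist (bstep n dist 1000000000 0) 1)
      (d := 2) with h2 | ⟨v, hv, h2⟩
  · rw [h2]
    rcases bstep_cases (n := n) (dist := dist) (b := bstep n dist 1000000000 0)
        (d := 1) with h1 | ⟨v, hv, h1⟩
    · rw [h1]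
      rcases bstep_cases (n := n) (dist := dist) (b := (1000000000 : Int))
          (d := 0) with h0 | ⟨v, hv, h0⟩
      · rw [h0]; exact Or.inl rfl
      · exact Or.inr ⟨0, v, by omega, hv, h0⟩
    · exact Or.inr ⟨1, v, by omega, hv, h1⟩
  · exact Or.inr ⟨2, v, by omega, hv, h2⟩


-- ===== VERDICT (by name: the statement is the Claim_ definition above) =====
theorem solution_spec : Claim_equal_solution := by
  unfold Claim_equal_solution
  intro board _ hpre
  unfold Spec_solution
  have hn : (1 : Int) ≤ (board.length : Int) := by
    rcases board with _ | ⟨r, rs⟩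
    · exact absurd rfl hpre.1
    · simp
  set n : Int := (board.length : Int) with hndef
  -- B's final table and its properties
  set df := loopB n board initDist initDist_inv with hdf
  have hinit_a : AchB n board initDist := by
    intro s v hv
    unfold initDist at hv
    split at hv
    · rename_i hs
      injection hv with hv
      subst hs; rw [← hv]; exact ReachF.start
    · simp at hv
  have hinit_d : D2B initDist := fun s _ => rfl
  have hP := loopB_pres initDist initDist_inv hinit_a hinit_d
  have hach : AchB n board df := hP.1
  have hd2 : D2B df := hP.2.1
  have hfix : roundB n board df = (df, false) := hP.2.2
  have hub := reach_ub hn hfix hd2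
  have halt : solution_alt board = bestOf n df := rfl
  have hsol : solution board = loopA n board [] [(0, (0, 0, 2))] 1000000000
      (by intro e he; simp at he; subst he; exact List.mem_cons_self) := rfl
  -- best is a lower bound for every pruned goal-walk cost
  have hbest : ∀ t c, ReachP n board t c → GoalS n t → bestOf n df ≤ c := by
    intro t c hR hg
    have hF := reachP_F hR
    have hmem := reachF_mem hn hF
    have hb := mem_stateListB_elim hmem
    rcases hub t c hF with ⟨u, hdu, hle⟩
    have ht : t = (n - 1, n - 1, t.2.2) := by
      rcases hg with ⟨h1, h2⟩
      exact Prod.ext h1 (Prod.ext h2 rfl)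
    rw [ht] at hdu
    exact le_trans (bestOf_le (by omega) hdu) hle
  -- lower bound: A's answer ≥ best
  have hge : bestOf n df ≤ solution board := by
    rw [hsol]
    refine loopA_ge n board _ hbest _ _ _ _ ?_ (bestOf_le_top n df)
    intro e he
    simp at he
    subst he
    exact ReachP.start
  -- upper bound: A's answer ≤ best
  have hgood : GoodA n board [] [] [(0, (0, 0, 2))] 1000000000 := by
    refine ⟨?_, ?_, ?_, ?_, ?_, ?_, ?_, ?_, le_rfl, ?_⟩
    · simp
    · exact List.Pairwise.nil
    · simp
    · simp
    · intro P₁ c s P₂ h; simp at h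
    · simp
    · intro e he; simp at he; subst he; exact ReachP.start
    · simp
    · simp
  have hle2 := loopA_le n board [] [(0, (0, 0, 2))] 1000000000
      (by intro e he; simp at he; subst he; exact List.mem_cons_self) [] hgood
  have hle : solution board ≤ bestOf n df := by
    rcases bestOf_cases n df with hc | ⟨dd, v, hdd, hdv, hv⟩
    · rw [hc, hsol]; exact hle2.2
    · have hF : ReachF n board (n - 1, n - 1, dd) v := hach _ _ hdv
      rcases reachF_prefix hF with hP | ⟨t', c', hg', hle', hP⟩
      · rw [hv, hsol]
        exact hle2.1 _ _ hP ⟨rfl, rfl⟩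
      · rw [hv, hsol]
        exact le_trans (hle2.1 _ _ hP hg') hle'
  rw [halt]
  omega
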